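-- pv_equiv track=rewrite | github.com/mumair14741-sudo/mumair14741 | backend/real_user_traffic.py | _find_state_column
-- ===== SOURCE A (Python) =====
-- from typing import Any, Dict, List, Optional, Tuple
--
-- def _find_state_column(rows: List[Dict[str, Any]]) -> Optional[str]:
--     """Return the key in the row dicts that holds the US-state value, or None.
--     Looks for common name variations (state, State, region, st, state_code, etc.)."""
--     if not rows:
--         return None
--     # Gather all unique keys across first few rows
--     seen = []
--     for r in rows[:10]:
--         for k in r.keys():
--             if k not in seen:
--                 seen.append(k)
--     # Priority order
--     priority = [
--         "state", "State", "STATE",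
--         "state_code", "stateCode", "StateCode",
--         "region", "Region", "REGION",
--         "st", "ST",
--         "province", "Province",
--     ]
--     for p in priority:
--         if p in seen:
--             return p
--     # Fallback: case-insensitive match on any key ending in 'state'
--     for k in seen:
--         if k.strip().lower() in ("state", "st", "region", "state_code", "statecode"):
--             return k
--     return None
-- ===== SOURCE B (Python) =====
-- def _find_state_column(rows):
--     """Return the key in the row dicts that holds the US-state value, or None."""
--     if not rows:
--         return None
--     PRIORITY = ["state", "State", "STATE",
--                 "state_code", "stateCode", "StateCode",
--                 "region", "Region", "REGION",
--                 "st", "ST",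
--                 "province", "Province"]
--     rank = {p: i for i, p in enumerate(PRIORITY)}
--     # Single pass over the keys of the first 10 rows, tracking
--     # the best (lowest) priority rank seen and the first fallback key.
--     best = len(PRIORITY)
--     fallback = None
--     for r in rows[:10]:
--         for k in r:
--             i = rank.get(k)
--             if i is not None and i < best:
--                 best = i
--             if fallback is None and k.strip().lower() in ("state", "st", "region", "state_code", "statecode"):
--                 fallback = k
--     if best < len(PRIORITY):
--         return PRIORITY[best]
--     return fallback
-- ===== Notes on version B (the rewrite author's own statement) =====
-- stated objective: alternative
-- what changed: A builds a deduplicated first-appearance key index and then runs two staged scans over it (priority list, then normalized fallback); B makes a single pass over the keys of the first 10 rows with a (best-priority-rank, first-fallback-key) accumulator, using a precomputed rank dict, and only indexes the priority list at the end.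
import Mathlib
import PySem

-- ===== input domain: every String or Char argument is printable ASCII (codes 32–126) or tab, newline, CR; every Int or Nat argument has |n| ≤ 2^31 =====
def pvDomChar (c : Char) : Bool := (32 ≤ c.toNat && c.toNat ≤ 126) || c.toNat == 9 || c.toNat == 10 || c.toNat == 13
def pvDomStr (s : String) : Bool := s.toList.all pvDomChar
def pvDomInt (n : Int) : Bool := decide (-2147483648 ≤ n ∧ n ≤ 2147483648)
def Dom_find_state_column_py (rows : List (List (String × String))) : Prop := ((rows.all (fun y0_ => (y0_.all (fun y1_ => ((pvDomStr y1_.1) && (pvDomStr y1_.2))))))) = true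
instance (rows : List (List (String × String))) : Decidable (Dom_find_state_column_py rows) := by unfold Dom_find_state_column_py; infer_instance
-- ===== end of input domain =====

-- B replaces A's staged passes (build a deduplicated `seen` key index, scan the priority
-- list against it, rescan `seen` for the fallback) by ONE pass over the keys of the first
-- 10 rows, accumulating the best priority rank (via a rank dict) and the first fallback key.

-- ===== PORT A =====
-- literal port of A: build `seen` (unique keys of rows[:10] in first-appearance order),
-- scan the priority list against it, then scan `seen` with the normalized fallback test.
def find_state_column_py (rows : List (List (String × String))) : Option String :=
  if rows = [] then none
  else
    let seen : List String :=
      (PySem.List.slice rows none (some 10)).foldl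
        (fun seen r => r.foldl
          (fun seen kv => if seen.contains kv.1 then seen else seen ++ [kv.1]) seen) []
    let priority : List String :=
      ["state", "State", "STATE",
       "state_code", "stateCode", "StateCode",
       "region", "Region", "REGION",
       "st", "ST",
       "province", "Province"]
    match priority.find? (fun p => seen.contains p) with
    | some p => some p
    | none =>
      match seen.find? (fun k =>
          (["state", "st", "region", "state_code", "statecode"] : List String).contains
            (PySem.Str.lower (PySem.Str.strip k))) with
      | some k => some k
      | none => none

-- ===== PORT B =====
-- B's PRIORITY list and rank dict ({p: i for i, p in enumerate(PRIORITY)})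
def pvPriority : List String :=
  ["state", "State", "STATE",
   "state_code", "stateCode", "StateCode",
   "region", "Region", "REGION",
   "st", "ST",
   "province", "Province"]

def pvRank : PySem.Dict String Nat :=
  pvPriority.zipIdx.foldl (fun d pi => d.insert pi.1 pi.2) PySem.Dict.empty

-- the normalized fallback test  k.strip().lower() in ("state","st","region","state_code","statecode")
def pvQfb (k : String) : Bool :=
  (["state", "st", "region", "state_code", "statecode"] : List String).contains
    (PySem.Str.lower (PySem.Str.strip k))

-- B's loop body: update the best rank (i = rank.get(k); if i is not None and i < best)
-- and the first fallback key (if fallback is None and Qfb k)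
def pvStep (st : Nat × Option String) (k : String) : Nat × Option String :=
  let best :=
    match pvRank.get? k with
    | some i => if i < st.1 then i else st.1
    | none => st.1
  let fallback := if st.2 = none ∧ pvQfb k then some k else st.2
  (best, fallback)

-- literal port of B: single pass over the keys of rows[:10] with a (best, fallback) accumulator;
-- `PRIORITY[best]` under the guard `best < len(PRIORITY)` is the in-range element, so `pvPriority[st.1]?`.
def find_state_column_py_alt (rows : List (List (String × String))) : Option String :=
  if rows = [] then none
  else
    let st : Nat × Option String :=
      (rows.take 10).foldl (fun st r => r.foldl (fun st kv => pvStep st kv.1) st)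
        (pvPriority.length, none)
    if st.1 < pvPriority.length then pvPriority[st.1]? else st.2

-- ===== PRECONDITION & SPEC =====
def Spec_find_state_column_py (rows : List (List (String × String))) (out : Option String) : Prop := out = find_state_column_py_alt rows
instance (rows : List (List (String × String))) (out : Option String) : Decidable (Spec_find_state_column_py rows out) := by unfold Spec_find_state_column_py; infer_instance

-- ===== CLAIM (what is proved, stated in full; the proofs are below) =====
def Claim_equal_find_state_column_py : Prop := ∀ (rows : List (List (String × String))), Dom_find_state_column_py rows → Spec_find_state_column_py rows (find_state_column_py rows)

-- ===== LEMMAS AND PROOFS =====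

-- the "add key if unseen" step of A's index-building loop
def pvAddKey (s : List String) (k : String) : List String :=
  if s.contains k then s else s ++ [k]

-- minimum index (w.r.t. a priority list P) of any key of L; P.length if none occurs in P
def pvMinIdx (P : List String) : List String → Nat
  | [] => P.length
  | k :: L => min (P.idxOf k) (pvMinIdx P L)

theorem pvMinIdx_le (P L : List String) : pvMinIdx P L ≤ P.length := by
  induction L with
  | nil => simp [pvMinIdx]
  | cons k L ih => simpa [pvMinIdx] using Or.inr ih

theorem pvMinIdx_nil (L : List String) : pvMinIdx [] L = 0 := by
  induction L with
  | nil => rfl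
  | cons k L ih => simp [pvMinIdx, ih]

theorem pvMinIdx_cons (p : String) (P L : List String) :
    pvMinIdx (p :: P) L = if p ∈ L then 0 else pvMinIdx P L + 1 := by
  induction L with
  | nil => simp [pvMinIdx]
  | cons k L ih =>
    simp only [pvMinIdx, ih, List.idxOf_cons, List.mem_cons]
    by_cases hk : p = k
    · simp [hk]
    · have hbeq : (p == k) = false := by simpa using hk
      by_cases hm : p ∈ L <;> simp [hk, hm, hbeq, Nat.succ_min_succ]

theorem pv_findIdx_eq_minIdx (P L : List String) :
    P.findIdx (fun p => decide (p ∈ L)) = pvMinIdx P L := by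
  induction P with
  | nil => simp [pvMinIdx_nil]
  | cons p P ih =>
    rw [List.findIdx_cons, pvMinIdx_cons]
    by_cases h : p ∈ L <;> simp [h, ih]

theorem pv_find?_eq_getElem?_minIdx (P L : List String) :
    P.find? (fun p => decide (p ∈ L)) = P[pvMinIdx P L]? := by
  rw [← pv_findIdx_eq_minIdx]
  induction P with
  | nil => simp
  | cons p P ih =>
    rw [List.find?_cons, List.findIdx_cons]
    by_cases h : p ∈ L <;> simp [h, ih]

-- membership in the accumulated `seen` list
theorem pvAddKey_foldl_mem (L : List String) (acc : List String) (x : String) :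
    (x ∈ L.foldl pvAddKey acc) ↔ (x ∈ acc ∨ x ∈ L) := by
  induction L generalizing acc with
  | nil => simp
  | cons k L ih =>
    simp only [List.foldl_cons, ih, pvAddKey]
    split_ifs with h
    · simp only [List.contains_eq_mem, decide_eq_true_eq] at h
      constructor
      · rintro (hx | hx) <;> simp_all
      · rintro (hx | hx)
        · exact Or.inl hx
        · rcases List.mem_cons.mp hx with rfl | hx
          · exact Or.inl h
          · exact Or.inr hx
    · simp [List.mem_append, List.mem_cons, or_assoc, or_comm, or_left_comm]

-- find? over the accumulated `seen` list: first match in acc, else first match in L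
theorem pvAddKey_foldl_find? (Q : String → Bool) (L : List String) (acc : List String) :
    (L.foldl pvAddKey acc).find? Q = (acc.find? Q).or (L.find? Q) := by
  induction L generalizing acc with
  | nil => simp
  | cons k L ih =>
    simp only [List.foldl_cons, ih, pvAddKey]
    split_ifs with h
    · simp only [List.contains_eq_mem, decide_eq_true_eq] at h
      cases hacc : acc.find? Q with
      | some v => simp
      | none =>
        have hk : Q k = false := by
          have := List.find?_eq_none.mp hacc k h
          simpa using this
        simp [hk]
    · rw [List.find?_append]
      cases hacc : acc.find? Q with
      | some v => simp
      | none =>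
        simp only [Option.none_or]
        cases hk : Q k with
        | true => simp [hk]
        | false => simp [hk]

-- A's `seen` equals the fold of pvAddKey over the flattened key list of rows[:10]
theorem pv_seen_eq (rows : List (List (String × String))) :
    (PySem.List.slice rows none (some 10)).foldl
        (fun seen r => r.foldl
          (fun seen kv => if seen.contains kv.1 then seen else seen ++ [kv.1]) seen) [] =
      ((rows.take 10).flatMap (fun r => r.map Prod.fst)).foldl pvAddKey [] := by
  have hs : PySem.List.slice rows none (some 10) = rows.take 10 := by simp [pysem]
  rw [hs, List.foldl_flatMap]
  simp only [List.foldl_map, pvAddKey]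

-- B's rank dict looks up the index of k in pvPriority
theorem pvRank_get? (k : String) :
    pvRank.get? k = if k ∈ pvPriority then some (pvPriority.idxOf k) else none := by
  have hnodup : pvRank.keys.Nodup := by decide
  split_ifs with h
  · have hlt : pvPriority.idxOf k < pvPriority.length := List.idxOf_lt_length_of_mem h
    refine PySem.Dict.get?_of_mem_items _ ?_ hnodup
    have hitems : pvRank.items = pvPriority.zipIdx := by decide
    rw [hitems, List.mk_mem_zipIdx_iff_getElem?]
    rw [List.getElem?_eq_getElem hlt, List.getElem_idxOf]
  · have hkeys : pvRank.keys = pvPriority := by decide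
    rw [PySem.Dict.get?_eq_none_iff_not_mem_keys, hkeys]
    exact h

-- B's step equals a min with the idxOf in pvPriority (plus the fallback update)
theorem pv_step_eq (b : Nat) (f : Option String) (k : String) (hb : b ≤ 13) :
    pvStep (b, f) k =
      (min b (pvPriority.idxOf k), if f = none ∧ pvQfb k then some k else f) := by
  unfold pvStep
  rw [pvRank_get?]
  by_cases h : k ∈ pvPriority
  · have hlt : pvPriority.idxOf k < pvPriority.length := List.idxOf_lt_length_of_mem h
    have hlen : pvPriority.length = 13 := rfl
    simp only [h, if_true]
    refine Prod.ext ?_ rfl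
    show (if pvPriority.idxOf k < b then pvPriority.idxOf k else b) = _
    rw [min_def]; split_ifs <;> omega
  · have hlen : pvPriority.idxOf k = pvPriority.length := List.idxOf_eq_length_iff.2 h
    have hlen13 : pvPriority.length = 13 := rfl
    simp only [h, if_false]
    refine Prod.ext ?_ rfl
    show b = min b (pvPriority.idxOf k)
    rw [min_def]; split_ifs <;> omega

-- B's pair fold splits into the min-index and the first fallback match
theorem pv_fold_eq (L : List String) (b : Nat) (f : Option String) (hb : b ≤ 13) :
    L.foldl pvStep (b, f) = (min b (pvMinIdx pvPriority L), f.or (L.find? pvQfb)) := by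
  induction L generalizing b f with
  | nil =>
    simp [pvMinIdx, show pvPriority.length = 13 from rfl, Nat.min_eq_left hb]
  | cons k L ih =>
    rw [List.foldl_cons, pv_step_eq b f k hb]
    have hb' : min b (pvPriority.idxOf k) ≤ 13 := le_trans (Nat.min_le_left _ _) hb
    rw [ih _ _ hb']
    simp only [pvMinIdx]
    refine Prod.ext ?_ ?_
    · show min (min b _) _ = min b (min _ _)
      rw [Nat.min_assoc]
    · show (if f = none ∧ pvQfb k then some k else f).or _ = f.or ((k :: L).find? pvQfb)
      rw [List.find?_cons]
      cases f with
      | some v => simp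
      | none => by_cases hq : pvQfb k <;> simp [hq]

-- ===== VERDICT (by name: the statement is the Claim_ definition above) =====
theorem find_state_column_py_spec : Claim_equal_find_state_column_py := by
  intro rows _
  unfold Spec_find_state_column_py find_state_column_py find_state_column_py_alt
  by_cases hrows : rows = []
  · simp [hrows]
  · simp only [if_neg hrows]
    rw [pv_seen_eq]
    set L := (rows.take 10).flatMap (fun r => r.map Prod.fst) with hL
    -- B's nested pair fold over rows[:10] is the flat fold over the key stream L
    have hB : (rows.take 10).foldl (fun st r => r.foldl (fun st kv => pvStep st kv.1) st)
        (pvPriority.length, none) =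
        (pvMinIdx pvPriority L, L.find? pvQfb) := by
      have hflat : (rows.take 10).foldl (fun st r => r.foldl (fun st kv => pvStep st kv.1) st)
          (pvPriority.length, none) = L.foldl pvStep (pvPriority.length, none) := by
        rw [hL, List.foldl_flatMap]
        simp only [List.foldl_map]
      rw [hflat, pv_fold_eq L pvPriority.length none (by decide)]
      rw [Nat.min_eq_right (pvMinIdx_le _ _), Option.none_or]
    rw [hB]
    -- A's priority scan finds the element at the minimum index
    have hpred : (fun p => (L.foldl pvAddKey []).contains p)
        = (fun p => decide (p ∈ L)) := by
      funext p
      simp [List.contains_eq_mem, pvAddKey_foldl_mem]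
    have hfind : (pvPriority.find? fun p => (L.foldl pvAddKey []).contains p)
        = pvPriority[pvMinIdx pvPriority L]? := by
      rw [hpred, pv_find?_eq_getElem?_minIdx]
    rw [show (["state", "State", "STATE", "state_code", "stateCode", "StateCode",
        "region", "Region", "REGION", "st", "ST", "province", "Province"] : List String)
        = pvPriority from rfl, hfind]
    -- A's fallback scan over `seen` is the first match in L
    have hfall : (L.foldl pvAddKey []).find? (fun k =>
        (["state", "st", "region", "state_code", "statecode"] : List String).contains
          (PySem.Str.lower (PySem.Str.strip k))) = L.find? pvQfb := by
      rw [show (fun k =>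
        (["state", "st", "region", "state_code", "statecode"] : List String).contains
          (PySem.Str.lower (PySem.Str.strip k))) = pvQfb from rfl]
      rw [pvAddKey_foldl_find?]; simp
    rw [hfall]
    have hle : pvMinIdx pvPriority L ≤ 13 := pvMinIdx_le pvPriority L
    by_cases hm : pvMinIdx pvPriority L < pvPriority.length
    · rw [if_pos hm, List.getElem?_eq_getElem hm]
    · rw [if_neg hm]
      have h13 : pvMinIdx pvPriority L = 13 := by
        have : pvPriority.length = 13 := rfl
        omega
      rw [h13, show (pvPriority[(13 : Nat)]? : Option String) = none from rfl]
      cases L.find? pvQfb with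
      | some k => rfl
      | none => rfl
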